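-- pv_equiv track=rewrite | github.com/bqelibari/recursive-dictionary-creation | main.py | create_paths
-- ===== SOURCE A (Python) =====
-- def create_paths(starting_path_str, depth, dir_name_list):
--     amount_of_dirs = _calculate_total_amount_of_dirs(depth=depth, amount_of_dirs=len(dir_name_list))
--     paths_list = [starting_path_str]
--     path_counter = 0
--     for path in paths_list:
--         for folder in dir_name_list:
--             if len(paths_list) > amount_of_dirs:
--                 break
--             paths_list.append(path + folder)
--             path_counter += 1
--     return paths_list
--
-- def _calculate_total_amount_of_dirs(depth: int, amount_of_dirs: int):
--     amount = 0
--     for num in range(1, depth + 1):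
--         amount += amount_of_dirs ** num
--     return amount
-- ===== SOURCE B (Python) =====
-- def create_paths(starting_path_str, depth, dir_name_list):
--     result = [starting_path_str]
--     current = [starting_path_str]
--     for _ in range(depth):
--         current = [p + f for p in current for f in dir_name_list]
--         result.extend(current)
--     return result
-- ===== Notes on version B (the rewrite author's own statement) =====
-- stated objective: simpler
-- what changed: Replaced the self-growing list traversal with a precomputed size cap (and dropped the _calculate_total_amount_of_dirs helper) by a depth-indexed frontier loop: each iteration expands the current level and extends the result, producing the same BFS order.
import Mathlib
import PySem

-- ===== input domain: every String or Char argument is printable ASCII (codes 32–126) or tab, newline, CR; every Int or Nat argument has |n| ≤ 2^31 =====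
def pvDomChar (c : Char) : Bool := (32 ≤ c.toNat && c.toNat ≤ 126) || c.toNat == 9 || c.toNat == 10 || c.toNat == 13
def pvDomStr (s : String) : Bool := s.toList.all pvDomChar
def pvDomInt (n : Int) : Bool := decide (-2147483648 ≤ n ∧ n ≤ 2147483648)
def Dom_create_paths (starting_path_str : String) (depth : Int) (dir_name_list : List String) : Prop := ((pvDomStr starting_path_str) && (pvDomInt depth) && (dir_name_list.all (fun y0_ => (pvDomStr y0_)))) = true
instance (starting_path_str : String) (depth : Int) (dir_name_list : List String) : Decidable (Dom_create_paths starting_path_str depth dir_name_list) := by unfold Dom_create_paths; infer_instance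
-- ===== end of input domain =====

-- B replaces A's self-growing list with a precomputed size cap by a depth-indexed
-- frontier loop (objective: simpler); same BFS order and values, proved equal below.

-- ===== PORT A =====
-- _calculate_total_amount_of_dirs: every num in range(1, depth+1) satisfies 1 ≤ num,
-- so `num.toNat` is exact for the exponent amount_of_dirs ** num
def calculate_total_amount_of_dirs (depth : Int) (amount_of_dirs : Int) : Int :=
  (PySem.List.pyRange 1 (depth + 1) 1).foldl
    (fun amount num => amount + amount_of_dirs ^ num.toNat) 0

-- inner `for folder in dir_name_list` loop; Python's `break` is rendered as a
-- per-element no-op, exact because len(paths_list) never decreases, so once the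
-- break condition holds it holds for the rest of the inner loop
def aInner (amount : Int) (path : String) (dirs : List String) (paths : List String) : List String :=
  dirs.foldl
    (fun ps folder => if (ps.length : Int) > amount then ps else ps ++ [path ++ folder])
    paths

-- outer `for path in paths_list` loop over the growing list, by index; the fuel
-- argument only makes the recursion total (both exhaustion branches return paths)
def aLoop (dirs : List String) (amount : Int) : Nat → Nat → List String → List String
  | 0, _, paths => paths
  | fuel+1, i, paths =>
    match paths[i]? with
    | none => paths
    | some path => aLoop dirs amount fuel (i+1) (aInner amount path dirs paths)

def create_paths (starting_path_str : String) (depth : Int) (dir_name_list : List String) : List String :=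
  let amount := calculate_total_amount_of_dirs depth (dir_name_list.length : Int)
  aLoop dir_name_list amount (amount.toNat + 2) 0 [starting_path_str]

-- ===== PORT B =====
-- for _ in range(depth): current = [p + f for p in current for f in dir_name_list]; result += current
def create_paths_alt (starting_path_str : String) (depth : Int) (dir_name_list : List String) : List String :=
  ((PySem.List.pyRange 0 depth 1).foldl
    (fun (acc : List String × List String) _ =>
      let next := acc.2.flatMap (fun p => dir_name_list.map (fun f => p ++ f))
      (acc.1 ++ next, next))
    ([starting_path_str], [starting_path_str])).1

-- ===== PRECONDITION & SPEC =====
def Spec_create_paths (starting_path_str : String) (depth : Int) (dir_name_list : List String) (out : List String) : Prop := out = create_paths_alt starting_path_str depth dir_name_list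
instance (starting_path_str : String) (depth : Int) (dir_name_list : List String) (out : List String) : Decidable (Spec_create_paths starting_path_str depth dir_name_list out) := by unfold Spec_create_paths; infer_instance

-- ===== CLAIM (what is proved, stated in full; the proofs are below) =====
def Claim_equal_create_paths : Prop := ∀ (starting_path_str : String) (depth : Int) (dir_name_list : List String), Dom_create_paths starting_path_str depth dir_name_list → Spec_create_paths starting_path_str depth dir_name_list (create_paths starting_path_str depth dir_name_list)

-- ===== LEMMAS AND PROOFS =====

-- one BFS level grown from a frontier
def expandL (dirs : List String) (xs : List String) : List String :=
  xs.flatMap (fun p => dirs.map (fun f => p ++ f))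

-- the e levels grown below a frontier, concatenated in BFS order
def tailL (dirs : List String) : Nat → List String → List String
  | 0, _ => []
  | e+1, xs => expandL dirs xs ++ tailL dirs e (expandL dirs xs)

-- total node count of the e levels below a frontier of size 1
def gfun (n : Nat) : Nat → Nat
  | 0 => 0
  | e+1 => n * (1 + gfun n e)

theorem expandL_append (dirs xs ys : List String) :
    expandL dirs (xs ++ ys) = expandL dirs xs ++ expandL dirs ys := by
  simp [expandL]

theorem expandL_length (dirs xs : List String) :
    (expandL dirs xs).length = xs.length * dirs.length := by
  induction xs with
  | nil => simp [expandL]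
  | cons p xs ih =>
    have h : expandL dirs (p :: xs) = dirs.map (fun f => p ++ f) ++ expandL dirs xs := by
      simp [expandL]
    rw [h]
    simp [ih]
    ring

theorem tailL_length (dirs : List String) (e : Nat) (xs : List String) :
    (tailL dirs e xs).length = xs.length * gfun dirs.length e := by
  induction e generalizing xs with
  | zero => simp [tailL, gfun]
  | succ e ih =>
    simp [tailL, gfun, expandL_length, ih]
    ring

theorem gfun_succ_right (n e : Nat) : gfun n (e+1) = gfun n e + n ^ (e+1) := by
  induction e with
  | zero => simp [gfun]
  | succ e ih =>
    calc gfun n (e+1+1) = n * (1 + gfun n (e+1)) := rfl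
      _ = n * (1 + (gfun n e + n ^ (e+1))) := by rw [ih]
      _ = n * (1 + gfun n e) + n ^ (e+1+1) := by ring
      _ = gfun n (e+1) + n ^ (e+1+1) := rfl

theorem amount_eq_nat (n : ℕ) (m : Nat) :
    calculate_total_amount_of_dirs (m : Int) (n : Int) = (gfun n m : Int) := by
  induction m with
  | zero =>
    simp [calculate_total_amount_of_dirs, gfun]
  | succ m ih =>
    have hsplit : PySem.List.pyRange 1 ((m:Int) + 1 + 1) 1
        = PySem.List.pyRange 1 ((m:Int) + 1) 1 ++ [(m:Int) + 1] := by
      have := PySem.List.pyRange_one_succ_right (a := 1) (b := (m:Int) + 1) (by omega)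
      simpa using this
    unfold calculate_total_amount_of_dirs at ih ⊢
    have hc : (((m+1 : Nat) : Int)) + 1 = (m:Int) + 1 + 1 := by push_cast; ring
    rw [hc, hsplit, List.foldl_append, ih]
    simp [gfun_succ_right]

theorem amount_eq (d : Int) (n : Nat) :
    calculate_total_amount_of_dirs d (n : Int) = (gfun n d.toNat : Int) := by
  by_cases h : 0 ≤ d
  · obtain ⟨m, rfl⟩ : ∃ m : Nat, d = (m : Int) := ⟨d.toNat, by omega⟩
    rw [amount_eq_nat]
    simp
  · rw [show d.toNat = 0 by omega]

    simp [calculate_total_amount_of_dirs, PySem.List.pyRange_one_eq_nil (by omega : d + 1 ≤ 1), gfun]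

-- B's fold, characterised: result = seed ++ the l.length levels below the frontier
theorem foldB (dirs : List String) (l : List Int) (res cur : List String) :
    ((l.foldl
      (fun (acc : List String × List String) _ =>
        let next := acc.2.flatMap (fun p => dirs.map (fun f => p ++ f))
        (acc.1 ++ next, next))
      (res, cur)).1) = res ++ tailL dirs l.length cur := by
  induction l generalizing res cur with
  | nil => simp [tailL]
  | cons x l ih =>
    simp only [List.foldl_cons, ih]
    simp [tailL, expandL, List.append_assoc]

theorem alt_eq (s : String) (d : Int) (dirs : List String) :
    create_paths_alt s d dirs = [s] ++ tailL dirs d.toNat [s] := by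
  unfold create_paths_alt
  rw [foldB]
  simp [PySem.List.length_pyRange_one]

theorem aInner_noop (amount : Int) (p : String) (dirs paths : List String)
    (h : amount < (paths.length : Int)) : aInner amount p dirs paths = paths := by
  unfold aInner
  induction dirs with
  | nil => simp
  | cons f fs ih =>
    simp only [List.foldl_cons]
    rw [if_pos (by exact_mod_cast h)]
    exact ih

theorem aInner_app (amount : Int) (p : String) (dirs : List String) :
    ∀ paths : List String, (paths.length + dirs.length : Int) ≤ amount + 1 →
    aInner amount p dirs paths = paths ++ dirs.map (fun f => p ++ f) := by
  unfold aInner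
  induction dirs with
  | nil => intro paths _; simp
  | cons f fs ih =>
    intro paths h
    simp only [List.foldl_cons, List.length_cons] at *
    rw [if_neg (by push_cast at h ⊢; omega)]
    rw [ih (paths ++ [p ++ f]) (by simp; push_cast at h ⊢; omega)]
    simp

theorem aLoop_drain (dirs : List String) (amount : Int) :
    ∀ (fuel i : Nat) (paths : List String), amount < (paths.length : Int) →
    aLoop dirs amount fuel i paths = paths := by
  intro fuel
  induction fuel with
  | zero => intro i paths _; rfl
  | succ fuel ih =>
    intro i paths h
    cases hg : paths[i]? with
    | none => simp [aLoop, hg]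
    | some p =>
      simp only [aLoop, hg]
      rw [aInner_noop amount p dirs paths h]
      exact ih (i+1) paths h

-- main invariant: with e+1 levels still allowed by the cap, the loop standing at the
-- head of the unprocessed frontier part c2 (children of the processed part c1 already
-- appended) finishes the BFS of the remaining levels
theorem aLoop_level (dirs : List String) (e : Nat) (c2 c1 done_ : List String) (fuel : Nat)
    (hfuel : (done_ ++ (c1 ++ c2) ++ tailL dirs (e+1) (c1 ++ c2)).length ≤ fuel + (done_.length + c1.length)) :
    aLoop dirs (((done_ ++ (c1 ++ c2) ++ tailL dirs (e+1) (c1 ++ c2)).length : Int) - 1) fuel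
      (done_.length + c1.length) (done_ ++ c1 ++ c2 ++ expandL dirs c1)
      = done_ ++ (c1 ++ c2) ++ tailL dirs (e+1) (c1 ++ c2) := by
  match c2, e with
  | p :: c2', e =>
    cases fuel with
    | zero =>
      exfalso
      simp [tailL_length] at hfuel
    | succ f =>
      have hidx : (done_ ++ c1 ++ (p :: c2') ++ expandL dirs c1)[done_.length + c1.length]? = some p := by
        rw [show done_ ++ c1 ++ (p :: c2') ++ expandL dirs c1
            = (done_ ++ c1) ++ (p :: (c2' ++ expandL dirs c1)) by simp [List.append_assoc]]
        rw [List.getElem?_append_right (by simp)]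
        simp
      simp only [aLoop, hidx]
      have h1 : (c1.length + 1) * dirs.length
          ≤ (c1.length + 1 + c2'.length) * (dirs.length * (1 + gfun dirs.length e)) :=
        Nat.mul_le_mul (by omega) (Nat.le_mul_of_pos_right dirs.length (by omega))
      have key : (done_ ++ c1 ++ (p :: c2') ++ expandL dirs c1).length + dirs.length
          ≤ (done_ ++ (c1 ++ p :: c2') ++ tailL dirs (e+1) (c1 ++ p :: c2')).length := by
        simp [tailL_length, expandL_length, gfun]
        nlinarith [h1]
      rw [aInner_app _ p dirs _ (by omega)]
      have hc : (c1 ++ [p]) ++ c2' = c1 ++ (p :: c2') := by simp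
      have H := aLoop_level dirs e c2' (c1 ++ [p]) done_ f (by
        rw [hc]
        simp only [List.length_append, List.length_cons, List.length_nil] at hfuel ⊢
        omega)
      have hx : expandL dirs [p] = dirs.map (fun f => p ++ f) := by simp [expandL]
      simp only [List.append_assoc, List.cons_append, List.nil_append,
        expandL_append, hx, List.length_append, List.length_cons, List.length_nil,
        Nat.add_assoc, Nat.zero_add] at H ⊢
      exact H
  | [], 0 =>
    have h1 : (done_ ++ (c1 ++ []) ++ tailL dirs (0+1) (c1 ++ [])).length
        = (done_ ++ c1 ++ [] ++ expandL dirs c1).length := by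
      simp [tailL]
    rw [aLoop_drain dirs _ fuel _ _ (by rw [h1]; omega)]
    simp [tailL]
  | [], e+1 =>
    have hlen : (done_ ++ c1 ++ ([] ++ expandL dirs c1) ++ tailL dirs (e+1) ([] ++ expandL dirs c1)).length
        = (done_ ++ (c1 ++ []) ++ tailL dirs (e+1+1) (c1 ++ [])).length := by
      simp [tailL_length, expandL_length, gfun]
      ring
    have H := aLoop_level dirs e (expandL dirs c1) [] (done_ ++ c1) fuel (by
      rw [show (done_ ++ c1) ++ ([] ++ expandL dirs c1) ++ tailL dirs (e+1) ([] ++ expandL dirs c1)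
          = done_ ++ c1 ++ ([] ++ expandL dirs c1) ++ tailL dirs (e+1) ([] ++ expandL dirs c1) by simp
      ] -- no-op association note
      rw [hlen]
      simp only [List.length_append, List.length_nil] at hfuel ⊢
      omega)
    simp only [tailL, List.append_assoc, List.append_nil, List.nil_append, List.length_append,
      List.length_nil, Nat.add_zero, expandL, List.flatMap_nil] at H ⊢
    exact H
termination_by (e, c2.length)

-- ===== VERDICT (by name: the statement is the Claim_ definition above) =====
theorem create_paths_spec : Claim_equal_create_paths := by
  intro s d dirs _
  unfold Spec_create_paths
  rw [alt_eq]
  simp only [create_paths]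
  rw [amount_eq d dirs.length]
  cases hm : d.toNat with
  | zero =>
    rw [aLoop_drain dirs _ _ _ _ (by simp [gfun])]
    simp [tailL]
  | succ e =>
    have hT : ((([] ++ ([] ++ [s]) ++ tailL dirs (e+1) ([] ++ [s])).length : Int) - 1)
        = ((gfun dirs.length (e+1) : Nat) : Int) := by
      simp [tailL_length]
    have H := aLoop_level dirs e [s] [] [] (gfun dirs.length (e+1) + 2) (by
      simp [tailL_length])
    rw [hT] at H
    simp only [List.nil_append, List.append_nil, List.length_nil, Nat.add_zero,
      expandL, List.flatMap_nil] at H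
    rw [Int.toNat_natCast]
    exact H
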